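-- pv_equiv track=rewrite | github.com/techwiz42/debabelizer | src/debabelizer/core/processor.py | _select_best_tts_provider
-- ===== SOURCE A (Python) =====
-- from typing import Dict, Any, Optional, List, AsyncGenerator, Union
--
-- def _select_best_tts_provider(available_providers: List[str], strategy: str) -> str:
--     """Select best TTS provider based on optimization strategy"""
--     # Define provider rankings for different strategies
--     provider_rankings = {
--         "cost": ["azure", "google", "openai", "elevenlabs"],  # Cheapest first
--         "latency": ["elevenlabs", "google", "azure", "openai"],  # Fastest first
--         "quality": ["elevenlabs", "google", "azure", "openai"],  # Best quality first
--         "balanced": ["elevenlabs", "google", "azure", "openai"]  # Balanced approach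
--     }
--
--     ranking = provider_rankings.get(strategy, provider_rankings["balanced"])
--
--     # Return first available provider in preference order
--     for provider in ranking:
--         if provider in available_providers:
--             return provider
--
--     # Fallback to first available
--     return available_providers[0]
-- ===== SOURCE B (Python) =====
-- from typing import List
--
-- def _select_best_tts_provider(available_providers: List[str], strategy: str) -> str:
--     """Select best TTS provider based on optimization strategy"""
--     provider_rankings = {
--         "cost": ["azure", "google", "openai", "elevenlabs"],
--         "latency": ["elevenlabs", "google", "azure", "openai"],
--         "quality": ["elevenlabs", "google", "azure", "openai"],
--         "balanced": ["elevenlabs", "google", "azure", "openai"],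
--     }
--     ranking = provider_rankings.get(strategy, provider_rankings["balanced"])
--     priority = {p: i for i, p in enumerate(ranking)}
--     # min is stable: first provider with the lowest rank; unranked providers share
--     # the worst key, so the first of them wins, matching the fallback to [0].
--     return min(available_providers, key=lambda p: priority.get(p, len(ranking)))
-- ===== Notes on version B (the rewrite author's own statement) =====
-- stated objective: idiomatic
-- what changed: Replaces the scan over the ranking with a membership test per provider by a priority table built once and a single stable min over the available providers keyed by rank.
import Mathlib
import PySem

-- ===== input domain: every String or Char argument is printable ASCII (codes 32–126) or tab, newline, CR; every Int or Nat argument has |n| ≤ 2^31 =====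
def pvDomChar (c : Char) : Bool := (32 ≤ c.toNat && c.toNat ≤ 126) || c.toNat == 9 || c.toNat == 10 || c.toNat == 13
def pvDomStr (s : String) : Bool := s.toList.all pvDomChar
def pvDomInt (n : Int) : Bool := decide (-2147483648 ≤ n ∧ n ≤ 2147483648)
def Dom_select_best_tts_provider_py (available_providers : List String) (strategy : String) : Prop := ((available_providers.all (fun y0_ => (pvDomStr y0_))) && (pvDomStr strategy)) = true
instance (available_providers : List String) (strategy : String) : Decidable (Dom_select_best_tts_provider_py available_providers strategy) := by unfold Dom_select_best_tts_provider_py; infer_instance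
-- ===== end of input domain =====

-- B replaces A's scan of the ranking (membership test per ranked provider) by a
-- priority table and a single stable `min` over the available providers keyed by rank
-- (idiomatic decomposition; same result on every non-empty provider list).

-- ===== PORT A =====
-- the literal rankings dict of A (and of B, which copies it verbatim)
def pvRankings : PySem.Dict String (List String) :=
  PySem.Dict.ofList
    [ ("cost", ["azure", "google", "openai", "elevenlabs"]),
      ("latency", ["elevenlabs", "google", "azure", "openai"]),
      ("quality", ["elevenlabs", "google", "azure", "openai"]),
      ("balanced", ["elevenlabs", "google", "azure", "openai"]) ]

-- A's 'for provider in ranking: if provider in available_providers: return provider'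
-- with the fallback 'available_providers[0]' (IndexError on [] — excluded by Pre_)
def pvALoop (available_providers : List String) : List String → String
  | [] => PySem.List.pyGetD available_providers 0 ""
  | p :: rest => if p ∈ available_providers then p else pvALoop available_providers rest

def select_best_tts_provider_py (available_providers : List String) (strategy : String) : String :=
  let ranking := pvRankings.getD strategy (pvRankings.getD "balanced" [])
  pvALoop available_providers ranking

-- ===== PORT B =====
-- '{p: i for i, p in enumerate(ranking)}'
def pvPriority (ranking : List String) : PySem.Dict String Int :=
  (PySem.List.enumerate ranking 0).foldl (fun d ip => d.insert ip.2 ip.1) PySem.Dict.empty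

def select_best_tts_provider_py_alt (available_providers : List String) (strategy : String) : String :=
  let ranking := pvRankings.getD strategy (pvRankings.getD "balanced" [])
  let priority := pvPriority ranking
  -- min(available_providers, key=…) raises ValueError on [] — excluded by Pre_
  (PySem.List.min? available_providers (fun p => priority.getD p (PySem.List.len ranking))).getD ""

-- ===== PRECONDITION & SPEC =====
-- A raises IndexError (and B's min raises ValueError) on an empty provider list.
def Pre_select_best_tts_provider_py (available_providers : List String) (strategy : String) : Prop :=
  available_providers ≠ []
instance (available_providers : List String) (strategy : String) : Decidable (Pre_select_best_tts_provider_py available_providers strategy) := by unfold Pre_select_best_tts_provider_py; infer_instance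

def pvWitness_select_best_tts_provider_py : List String × String := (["google", "azure"], "cost")

def Spec_select_best_tts_provider_py (available_providers : List String) (strategy : String) (out : String) : Prop := out = select_best_tts_provider_py_alt available_providers strategy
instance (available_providers : List String) (strategy : String) (out : String) : Decidable (Spec_select_best_tts_provider_py available_providers strategy out) := by unfold Spec_select_best_tts_provider_py; infer_instance

-- ===== CLAIM (what is proved, stated in full; the proofs are below) =====
def Claim_equal_select_best_tts_provider_py : Prop := ∀ (available_providers : List String) (strategy : String), Dom_select_best_tts_provider_py available_providers strategy → Pre_select_best_tts_provider_py available_providers strategy → Spec_select_best_tts_provider_py available_providers strategy (select_best_tts_provider_py available_providers strategy)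

-- ===== LEMMAS AND PROOFS =====

-- keyAux r p = (rank of p in r, or r.length if unranked); used to characterise B's key
def pvKey (r : List String) (p : String) : Int :=
  match r with
  | [] => 0
  | q :: rest => if q == p then 0 else pvKey rest p + 1

-- the step function of PySem.List.min? at key type Int
def pvStep (key : String -> Int) (acc : Option String) (x : String) : Option String :=
  match acc with
  | none => some x
  | some m => if key x < key m then some x else some m

theorem pvMin?_eq (xs : List String) (key : String -> Int) :
    PySem.List.min? xs key = xs.foldl (pvStep key) none := by
  unfold PySem.List.min?
  apply PySem.List.foldl_congr_mem
  intro acc x _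
  cases acc with
  | none => rfl
  | some m =>
    by_cases hlt : key x < key m
    · simp [pvStep, hlt]
    · simp [pvStep, hlt]

-- B's min? fold keeps a state `some p` whose key no later element beats
theorem pvMin_stay (key : String -> Int) (p : String) :
    forall (xs : List String), (forall x, x ∈ xs -> ¬ key x < key p) ->
      xs.foldl (pvStep key) (some p) = some p := by
  intro xs
  induction xs with
  | nil => intro _; rfl
  | cons x t ih =>
    intro h
    have hx : ¬ key x < key p := h x (by simp)
    simp only [List.foldl_cons, pvStep, if_neg hx]
    exact ih (fun y hy => h y (by simp [hy]))

-- if p has the strictly unique minimal key 0 and p ∈ xs, the fold ends at p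
theorem pvMin_hit (key : String -> Int) (p : String) (hp : key p = 0)
    (hnn : forall q, 0 ≤ key q) (huniq : forall q, key q = 0 -> q = p) :
    forall (xs : List String) (acc : Option String), p ∈ xs ->
      xs.foldl (pvStep key) acc = some p := by
  intro xs
  induction xs with
  | nil => intro acc h; cases h
  | cons x t ih =>
    intro acc hmem
    simp only [List.foldl_cons]
    by_cases ht : p ∈ t
    · exact ih _ ht
    · have hx : x = p := by
        rcases List.mem_cons.mp hmem with h | h
        · exact h.symm
        · exact absurd h ht
      rw [hx]
      have stay : forall y, y ∈ t -> ¬ key y < key p := by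
        intro y _ hlt; rw [hp] at hlt; have := hnn y; omega
      cases acc with
      | none => exact pvMin_stay key p t stay
      | some m =>
        by_cases hc : key p < key m
        · simp only [pvStep, if_pos hc]; exact pvMin_stay key p t stay
        · have hm0 : key m = 0 := by rw [hp] at hc; have := hnn m; omega
          have hmp : m = p := huniq m hm0
          simp only [pvStep, if_neg hc]
          rw [hmp]
          exact pvMin_stay key p t stay

-- shifting every key up by one (on the elements and the state) does not change the fold
theorem pvMin_shift (k1 k2 : String -> Int) :
    forall (xs : List String) (acc : Option String),
      (forall q, q ∈ xs -> k1 q = k2 q + 1) -> (forall m, acc = some m -> k1 m = k2 m + 1) ->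
      xs.foldl (pvStep k1) acc = xs.foldl (pvStep k2) acc := by
  intro xs
  induction xs with
  | nil => intro acc _ _; rfl
  | cons x t ih =>
    intro acc hxs hacc
    have hx : k1 x = k2 x + 1 := hxs x (by simp)
    have htail : forall q, q ∈ t -> k1 q = k2 q + 1 := fun q hq => hxs q (by simp [hq])
    simp only [List.foldl_cons]
    cases acc with
    | none =>
      exact ih (some x) htail (by intro m hm; cases hm; exact hx)
    | some m =>
      have hm : k1 m = k2 m + 1 := hacc m rfl
      have hiff : (k1 x < k1 m) = (k2 x < k2 m) := by
        rw [hx, hm]; simp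
      simp only [pvStep, hiff]
      by_cases hc : k2 x < k2 m
      · simp only [if_pos hc]
        exact ih (some x) htail (by intro m' hm'; cases hm'; exact hx)
      · simp only [if_neg hc]
        exact ih (some m) htail (by intro m' hm'; cases hm'; exact hm)

theorem pvKey_nonneg (r : List String) (q : String) : 0 ≤ pvKey r q := by
  induction r with
  | nil => simp [pvKey]
  | cons p t ih => simp only [pvKey]; split_ifs <;> omega

-- pvKey (p :: rest) behaves as expected
theorem pvKey_cons_self (p : String) (rest : List String) : pvKey (p :: rest) p = 0 := by
  simp [pvKey]

theorem pvKey_cons_ne (p q : String) (rest : List String) (h : q ≠ p) :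
    pvKey (p :: rest) q = pvKey rest q + 1 := by
  have : (p == q) = false := by simp only [beq_eq_false_iff_ne, ne_eq]; exact fun e => h e.symm
  simp [pvKey, this]

-- MAIN: A's scan over any ranking equals B's keyed min over the providers
theorem pvMain (avail : List String) (h : avail ≠ []) :
    forall (r : List String),
      pvALoop avail r = (PySem.List.min? avail (fun p => pvKey r p)).getD "" := by
  intro r
  induction r with
  | nil =>
    cases avail with
    | nil => exact absurd rfl h
    | cons a t =>
      have hm : PySem.List.min? (a :: t) (fun p => pvKey [] p) = some a := by
        rw [pvMin?_eq]
        simp only [List.foldl_cons, pvStep]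
        exact pvMin_stay (fun q => pvKey [] q) a t (by intro x _; simp [pvKey])
      simp [pvALoop, hm, PySem.List.pyGetD_zero_cons]
  | cons p rest ih =>
    by_cases hp : p ∈ avail
    · have hmin : PySem.List.min? avail (fun q => pvKey (p :: rest) q) = some p := by
        rw [pvMin?_eq]
        exact pvMin_hit _ p (pvKey_cons_self p rest)
          (fun q => pvKey_nonneg _ q)
          (by
            intro q hq
            by_cases hqp : q = p
            · exact hqp
            · rw [pvKey_cons_ne p q rest hqp] at hq
              have := pvKey_nonneg rest q; omega)
          avail none hp
      simp [pvALoop, hp, hmin]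
    · have hshift : PySem.List.min? avail (fun q => pvKey (p :: rest) q)
          = PySem.List.min? avail (fun q => pvKey rest q) := by
        rw [pvMin?_eq, pvMin?_eq]
        exact pvMin_shift _ _ avail none
          (by
            intro q hq
            exact pvKey_cons_ne p q rest (fun e => hp (e ▸ hq)))
          (by intro m hm; cases hm)
      simp only [pvALoop, if_neg hp]
      rw [ih, hshift]

-- bridge: B's dict-built key equals pvKey, for the two concrete rankings
theorem pvBridge_cost :
    (fun p => (pvPriority ["azure", "google", "openai", "elevenlabs"]).getD p (4 : Int))
      = fun p => pvKey ["azure", "google", "openai", "elevenlabs"] p := by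
  funext p
  show (PySem.Dict.mk [("azure", (0:Int)), ("google", 1), ("openai", 2), ("elevenlabs", 3)]).getD p 4
      = pvKey ["azure", "google", "openai", "elevenlabs"] p
  simp only [PySem.Dict.getD, PySem.Dict.get?_mk_cons, pvKey]
  split_ifs <;> simp_all [PySem.Dict.get?]

theorem pvBridge_bal :
    (fun p => (pvPriority ["elevenlabs", "google", "azure", "openai"]).getD p (4 : Int))
      = fun p => pvKey ["elevenlabs", "google", "azure", "openai"] p := by
  funext p
  show (PySem.Dict.mk [("elevenlabs", (0:Int)), ("google", 1), ("azure", 2), ("openai", 3)]).getD p 4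
      = pvKey ["elevenlabs", "google", "azure", "openai"] p
  simp only [PySem.Dict.getD, PySem.Dict.get?_mk_cons, pvKey]
  split_ifs <;> simp_all [PySem.Dict.get?]

-- the ranking A and B select, as a function of the strategy
theorem pvRanking_eq (strategy : String) :
    pvRankings.getD strategy (pvRankings.getD "balanced" [])
      = if strategy = "cost" then ["azure", "google", "openai", "elevenlabs"]
        else ["elevenlabs", "google", "azure", "openai"] := by
  by_cases hc : strategy = "cost"
  · subst hc; rfl
  · have hb : (("cost" : String) == strategy) = false := by
      simp only [beq_eq_false_iff_ne, ne_eq]; exact fun e => hc e.symm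
    have hmk : pvRankings = PySem.Dict.mk
        [ ("cost", ["azure", "google", "openai", "elevenlabs"]),
          ("latency", ["elevenlabs", "google", "azure", "openai"]),
          ("quality", ["elevenlabs", "google", "azure", "openai"]),
          ("balanced", ["elevenlabs", "google", "azure", "openai"]) ] := by rfl
    have hdef : pvRankings.getD "balanced" ([] : List String)
        = ["elevenlabs", "google", "azure", "openai"] := by rfl
    rw [hdef]
    simp only [if_neg hc, hmk, PySem.Dict.getD, PySem.Dict.get?_mk_cons, hb]
    split_ifs <;> first | rfl | simp_all

-- ===== VERDICT (by name: the statement is the Claim_ definition above) =====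
theorem select_best_tts_provider_py_spec : Claim_equal_select_best_tts_provider_py := by
  intro avail strategy _ hpre
  unfold Spec_select_best_tts_provider_py
  unfold select_best_tts_provider_py select_best_tts_provider_py_alt
  rw [pvRanking_eq]
  by_cases hc : strategy = "cost"
  · simp only [if_pos hc]
    rw [show PySem.List.len ["azure", "google", "openai", "elevenlabs"] = 4 from rfl,
      pvBridge_cost]
    exact pvMain avail hpre _
  · simp only [if_neg hc]
    rw [show PySem.List.len ["elevenlabs", "google", "azure", "openai"] = 4 from rfl,
      pvBridge_bal]
    exact pvMain avail hpre _
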